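-- pv_equiv track=rewrite | github.com/openhwgroup/force-riscv | utils/enum_classes/enum_string_hash.py | _compute_hash_table
-- ===== SOURCE A (Python) =====
-- def _compute_hash_table(indexes, string_values):
--     hash_table = {}
--     duplicate_count = 0
--     for string_value in string_values:
--         length = len(string_value)
--         hash = 0
--
--         for i in indexes:
--             hash = hash ^ ord(string_value[i % length])
--
--         if hash in hash_table:
--             values = hash_table[hash]
--             values.append(string_value)
--             duplicate_count += 1
--         else:
--             hash_table[hash] = [string_value]
--
--     return (hash_table, duplicate_count)
-- ===== SOURCE B (Python) =====
-- def _compute_hash_table(indexes, string_values):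
--     def xor_hash(string_value):
--         length = len(string_value)
--         h = 0
--         for i in indexes:
--             h ^= ord(string_value[i % length])
--         return h
--
--     hashes = [xor_hash(s) for s in string_values]
--     order = list(dict.fromkeys(hashes))
--     hash_table = {h: [s for hs, s in zip(hashes, string_values) if hs == h]
--                   for h in order}
--     return (hash_table, len(string_values) - len(order))
-- ===== Notes on version B (the rewrite author's own statement) =====
-- stated objective: alternative
-- what changed: A's single incremental pass mutating a dict and a running duplicate counter is replaced by staged passes: compute all hashes first, dedupe them with dict.fromkeys to get the key order, build each bucket by filtering zip(hashes, string_values) in a dict comprehension, and derive duplicate_count as len(string_values) - len(order).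
import Mathlib
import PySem

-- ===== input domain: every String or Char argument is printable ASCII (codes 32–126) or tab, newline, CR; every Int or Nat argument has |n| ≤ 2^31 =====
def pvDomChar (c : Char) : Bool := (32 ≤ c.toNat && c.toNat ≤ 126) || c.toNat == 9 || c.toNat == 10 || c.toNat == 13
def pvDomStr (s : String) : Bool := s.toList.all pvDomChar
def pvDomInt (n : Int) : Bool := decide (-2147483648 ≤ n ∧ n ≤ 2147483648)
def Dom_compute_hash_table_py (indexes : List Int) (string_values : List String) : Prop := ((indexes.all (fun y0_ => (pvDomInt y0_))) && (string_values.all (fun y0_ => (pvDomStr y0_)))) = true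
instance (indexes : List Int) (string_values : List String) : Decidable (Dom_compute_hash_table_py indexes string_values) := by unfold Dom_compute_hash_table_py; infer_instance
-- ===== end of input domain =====

-- B replaces A's incremental dict-mutating pass by staged passes (hash list, ordered
-- dedup, buckets via filtering a dict comprehension, count by subtraction); objective: alternative.


-- ===== PORT A =====
-- inner hash loop, shared by both Pythons: hash = hash ^ ord(string_value[i % length]).
-- The 'none' branch (empty string with nonempty indexes ⇒ Python raises ZeroDivisionError) is excluded by Pre_.
def pvXorHash (indexes : List Int) (string_value : String) : Int :=
  let length : Int := (string_value.toList.length : Int)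
  ((indexes.foldl (fun (hash : Nat) i =>
      match PySem.Str.pyGet? string_value (PySem.Int.mod i length) with
      | some c => hash ^^^ c.toNat
      | none => hash) 0 : Nat) : Int)

-- loop body of A: branch on membership, append or insert, count duplicates as we go
def pvBodyA (indexes : List Int) (st : PySem.Dict Int (List String) × Int) (string_value : String) :
    PySem.Dict Int (List String) × Int :=
  let hash := pvXorHash indexes string_value
  if st.1.contains hash then
    (st.1.modify hash [] (fun values => values ++ [string_value]), st.2 + 1)
  else
    (st.1.insert hash [string_value], st.2)

def compute_hash_table_py (indexes : List Int) (string_values : List String) :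
    (List (Int × List String)) × Int :=
  let r := string_values.foldl (pvBodyA indexes) (PySem.Dict.empty, 0)
  (r.1.items, r.2)

-- ===== PORT B =====
-- staged passes: hashes, key order via dict.fromkeys, dict comprehension with
-- comprehension-filtered buckets, count by subtraction
def compute_hash_table_py_alt (indexes : List Int) (string_values : List String) :
    (List (Int × List String)) × Int :=
  let hashes := string_values.map (pvXorHash indexes)
  let order := PySem.List.dedup hashes
  let d := order.foldl
    (fun d h => d.insert h (((hashes.zip string_values).filter (fun p => p.1 == h)).map Prod.snd))
    PySem.Dict.empty
  (d.items, PySem.List.len string_values - PySem.List.len order)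

-- ===== PRECONDITION & SPEC =====
-- Pre_ excludes exactly the inputs on which Python A (and B) raises ZeroDivisionError:
-- an empty string among string_values while indexes is nonempty (i % 0).
def Pre_compute_hash_table_py (indexes : List Int) (string_values : List String) : Prop :=
  indexes = [] ∨ ∀ s ∈ string_values, s ≠ ""
instance (indexes : List Int) (string_values : List String) : Decidable (Pre_compute_hash_table_py indexes string_values) := by unfold Pre_compute_hash_table_py; infer_instance

def pvWitness_compute_hash_table_py : List Int × List String := ([0, 1], ["ab", "ba", "c"])

def Spec_compute_hash_table_py (indexes : List Int) (string_values : List String) (out : (List (Int × List String)) × Int) : Prop := out = compute_hash_table_py_alt indexes string_values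
instance (indexes : List Int) (string_values : List String) (out : (List (Int × List String)) × Int) : Decidable (Spec_compute_hash_table_py indexes string_values out) := by unfold Spec_compute_hash_table_py; infer_instance

-- ===== CLAIM (what is proved, stated in full; the proofs are below) =====
def Claim_equal_compute_hash_table_py : Prop := ∀ (indexes : List Int) (string_values : List String), Dom_compute_hash_table_py indexes string_values → Pre_compute_hash_table_py indexes string_values → Spec_compute_hash_table_py indexes string_values (compute_hash_table_py indexes string_values)

-- ===== LEMMAS AND PROOFS =====

-- A's branching body is the grouping 'modify' body plus a conditional counter bump
theorem pvBodyA_eq (indexes : List Int) (d : PySem.Dict Int (List String)) (c : Int) (s : String) :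
    pvBodyA indexes (d, c) s =
      (d.modify (pvXorHash indexes s) [] (fun values => values ++ [s]),
       if d.contains (pvXorHash indexes s) then c + 1 else c) := by
  unfold pvBodyA
  by_cases hc : d.contains (pvXorHash indexes s) = true
  · simp [hc]
  · simp only [hc, if_neg, Bool.false_eq_true, not_false_eq_true]
    unfold PySem.Dict.modify
    rw [PySem.Dict.getD_of_not_contains _ _ (by simpa using hc)]
    simp

-- the grouping fold
def pvGroup (indexes : List Int) (d : PySem.Dict Int (List String)) (l : List String) :
    PySem.Dict Int (List String) :=
  l.foldl (fun d s => d.modify (pvXorHash indexes s) [] (fun values => values ++ [s])) d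

theorem pvGroup_size (indexes : List Int) (d : PySem.Dict Int (List String)) (l : List String) :
    (pvGroup indexes d l).size =
      (PySem.Set.update d.keys (l.map (pvXorHash indexes))).length := by
  unfold pvGroup PySem.Dict.size
  have hk := PySem.Dict.keys_foldl_modify_key (l := l) (key := pvXorHash indexes)
    (d0 := ([] : List String)) (f := fun _ s => fun values => values ++ [s]) (d := d)
  calc _ = (l.foldl (fun d s => d.modify (pvXorHash indexes s) [] (fun values => values ++ [s])) d).keys.length := by
            simp [PySem.Dict.keys]
       _ = _ := by rw [hk]

-- loop invariant: A's fold is the grouping fold, and A's counter is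
-- (number processed) minus (growth of the dict)
theorem pvFoldA (indexes : List Int) (l : List String) :
    ∀ (d : PySem.Dict Int (List String)) (c : Int),
      l.foldl (pvBodyA indexes) (d, c)
        = (pvGroup indexes d l,
           c + (l.length : Int) + (d.size : Int) - ((pvGroup indexes d l).size : Int)) := by
  induction l with
  | nil => intro d c; simp [pvGroup]
  | cons s t ih =>
    intro d c
    have hstep : pvGroup indexes d (s :: t)
        = pvGroup indexes (d.modify (pvXorHash indexes s) [] (fun values => values ++ [s])) t := by
      simp [pvGroup]
    simp only [List.foldl_cons, pvBodyA_eq, List.length_cons]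
    rw [ih, hstep]
    have hsz : (d.modify (pvXorHash indexes s) [] (fun values => values ++ [s])).size
        = if d.contains (pvXorHash indexes s) then d.size else d.size + 1 := by
      unfold PySem.Dict.size PySem.Dict.modify
      rw [PySem.Dict.items_insert]
      by_cases hc : d.contains (pvXorHash indexes s) = true
      · simp [hc]
      · simp [hc]
    by_cases hc : d.contains (pvXorHash indexes s) = true
    · rw [if_pos hc, Prod.mk.injEq]
      exact ⟨rfl, by rw [hsz, if_pos hc]; push_cast; ring⟩
    · rw [if_neg hc, Prod.mk.injEq]
      exact ⟨rfl, by rw [hsz, if_neg hc]; push_cast; ring⟩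

-- buckets of the grouping fold from the empty dict are filters of zip(hashes, l)
theorem pvGroup_empty_getD (indexes : List Int) (l : List String) (h : Int) :
    (pvGroup indexes PySem.Dict.empty l).getD h [] =
      (((l.map (pvXorHash indexes)).zip l).filter (fun p => p.1 == h)).map Prod.snd := by
  have hz : (l.map (pvXorHash indexes)).zip l = l.map (fun s => (pvXorHash indexes s, s)) := by
    induction l with
    | nil => rfl
    | cons a t ih => simp [ih]
  have hf : (l.map (fun s => (pvXorHash indexes s, s))).foldl
        (fun d (p : Int × String) => d.modify p.1 [] (fun values => values ++ [p.2]))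
        PySem.Dict.empty
      = l.foldl (fun d s => d.modify (pvXorHash indexes s) [] (fun values => values ++ [s]))
        PySem.Dict.empty := by
    rw [List.foldl_map]
  unfold pvGroup
  rw [hz, ← hf, PySem.Dict.getD_foldl_modify_append]
  simp [PySem.Dict.getD_empty]

-- keys of the grouping fold from the empty dict = ordered dedup of the hashes
theorem pvGroup_empty_keys (indexes : List Int) (l : List String) :
    (pvGroup indexes PySem.Dict.empty l).keys = PySem.List.dedup (l.map (pvXorHash indexes)) := by
  unfold pvGroup
  rw [PySem.Dict.keys_foldl_modify_key]
  simp only [PySem.Dict.keys_empty, PySem.List.dedup_eq_ofList]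
  exact PySem.Set.update_nil_left _

theorem pvGroup_empty_nodup (indexes : List Int) (l : List String) :
    (pvGroup indexes PySem.Dict.empty l).keys.Nodup := by
  rw [pvGroup_empty_keys]
  simp

-- items of A's grouping fold, in closed form
theorem pvGroup_empty_items (indexes : List Int) (l : List String) :
    (pvGroup indexes PySem.Dict.empty l).items =
      (PySem.List.dedup (l.map (pvXorHash indexes))).map
        (fun h => (h, (((l.map (pvXorHash indexes)).zip l).filter (fun p => p.1 == h)).map Prod.snd)) := by
  rw [PySem.Dict.items_eq_map_keys _ (pvGroup_empty_nodup indexes l) ([] : List String),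
      pvGroup_empty_keys]
  exact List.map_congr_left (fun h _ => by rw [pvGroup_empty_getD])

-- items of B's dict comprehension, in the same closed form
theorem pvAlt_items (indexes : List Int) (l : List String) :
    ((PySem.List.dedup (l.map (pvXorHash indexes))).foldl
        (fun d h => d.insert h ((((l.map (pvXorHash indexes)).zip l).filter (fun p => p.1 == h)).map Prod.snd))
        PySem.Dict.empty).items =
      (PySem.List.dedup (l.map (pvXorHash indexes))).map
        (fun h => (h, (((l.map (pvXorHash indexes)).zip l).filter (fun p => p.1 == h)).map Prod.snd)) := by
  have := PySem.Dict.items_foldl_insert_fresh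
      (PySem.List.dedup (l.map (pvXorHash indexes)))
      (fun h => h)
      (fun h => (((l.map (pvXorHash indexes)).zip l).filter (fun p => p.1 == h)).map Prod.snd)
      PySem.Dict.empty
      (fun a _ => PySem.Dict.contains_empty a)
      (by simp)
  simpa using this

-- ===== VERDICT (by name: the statement is the Claim_ definition above) =====
theorem compute_hash_table_py_spec : Claim_equal_compute_hash_table_py := by
  intro indexes string_values _ _
  unfold Spec_compute_hash_table_py compute_hash_table_py compute_hash_table_py_alt
  simp only []
  rw [pvFoldA, Prod.mk.injEq]
  refine ⟨?_, ?_⟩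
  · rw [pvGroup_empty_items, pvAlt_items]
  · rw [pvGroup_size]
    simp only [PySem.Dict.keys_empty, PySem.List.len_eq, PySem.Dict.size_empty,
      PySem.Set.update_nil_left, PySem.List.dedup_eq_ofList]
    push_cast
    ring
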